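-- pv_equiv track=rewrite | github.com/icsa-hua/carla | PythonAPI/carla/agents/navigation/hybridga.py | find_best_path
-- ===== SOURCE A (Python) =====
-- def find_best_path(final_population):
--     # Assuming fitness_values is a list of fitness scores corresponding to each path in population
--     # and that a higher fitness score is better.
--     index_of_best = 0
--     best_paths = {}
--
--     for generation in final_population:
--         # keys = list(final_population[generation])
--         values = list(final_population[generation])
--         index_of_best = values.index(min(values))
--         best_paths[generation] = values[index_of_best]
--
--     best_fitness = list(best_paths.values())
--     index_of_best = best_fitness.index(min(best_fitness))
--     best_path = list(best_paths.keys())[index_of_best]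
--
--     return best_path
-- ===== SOURCE B (Python) =====
-- def find_best_path(final_population):
--     # One pass: keep the generation whose per-generation minimum fitness is
--     # smallest so far (strict improvement keeps the first occurrence, like
--     # A's min/.index tie-breaking).
--     best_path = None
--     best_fit = None
--     for generation, values in final_population.items():
--         m = min(values)
--         if best_fit is None or m < best_fit:
--             best_path, best_fit = generation, m
--     if best_path is None:
--         raise ValueError("empty population")
--     return best_path
-- ===== Notes on version B (the rewrite author's own statement) =====
-- stated objective: simpler
-- what changed: Collapses A's two passes (build a best_paths dict of per-generation minima, then re-scan its values with min/.index and index back into its keys) into one explicit loop that keeps the best generation and its minimum so far, updating only on strict improvement.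
-- outside the precondition, e.g. on find_best_path({}): A raises ValueError, B raises ValueError
import Mathlib
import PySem

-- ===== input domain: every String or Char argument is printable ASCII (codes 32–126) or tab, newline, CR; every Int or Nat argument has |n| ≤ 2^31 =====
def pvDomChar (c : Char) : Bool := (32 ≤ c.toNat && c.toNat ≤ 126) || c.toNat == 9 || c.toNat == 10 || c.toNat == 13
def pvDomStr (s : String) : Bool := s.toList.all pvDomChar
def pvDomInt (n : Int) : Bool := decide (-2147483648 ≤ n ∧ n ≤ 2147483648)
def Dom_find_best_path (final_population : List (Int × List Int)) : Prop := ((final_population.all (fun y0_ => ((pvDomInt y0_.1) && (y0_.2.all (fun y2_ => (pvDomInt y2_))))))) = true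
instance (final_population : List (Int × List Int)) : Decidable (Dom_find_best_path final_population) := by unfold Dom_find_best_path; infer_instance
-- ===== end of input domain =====

-- B replaces A's two passes (best_paths dict, then min/.index/keys indexing) by one
-- explicit loop keeping the best generation so far: same result, simpler decomposition.

-- ===== PORT A =====
-- literal transliteration of A: build best_paths (per-generation minimum found via
-- values.index(min(values)) and indexing), then index the overall min back into the keys.
def find_best_path (final_population : List (Int × List Int)) : Int :=
  let best_paths : PySem.Dict Int Int :=
    final_population.foldl
      (fun bp generation =>
        let values := (PySem.Dict.get? (PySem.Dict.mk final_population) generation.1).getD []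
        let index_of_best :=
          (PySem.List.index? values ((PySem.List.min? values (fun y => y)).getD 0)).getD 0
        PySem.Dict.insert bp generation.1
          ((PySem.List.pyGet? values (index_of_best : Int)).getD 0))
      (PySem.Dict.mk [])
  let best_fitness := PySem.Dict.values best_paths
  let index_of_best :=
    (PySem.List.index? best_fitness ((PySem.List.min? best_fitness (fun y => y)).getD 0)).getD 0
  (PySem.List.pyGet? (PySem.Dict.keys best_paths) (index_of_best : Int)).getD 0

-- ===== PORT B =====
-- literal transliteration of Source B: one fold keeping (best generation, best min) so far.
def find_best_path_alt (final_population : List (Int × List Int)) : Int :=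
  let best :=
    final_population.foldl
      (fun acc p =>
        let m := (PySem.List.min? p.2 (fun y => y)).getD 0
        match acc with
        | none => some (p.1, m)
        | some (bg, bv) => if m < bv then some (p.1, m) else some (bg, bv))
      none
  match best with
  | none => 0
  | some (bg, _) => bg

-- ===== PRECONDITION & SPEC =====
-- Pre_ excludes: the empty dict and any empty fitness list (A's min([]) raises ValueError
-- there), and association lists with duplicate generation keys, which do not denote a
-- distinct Python dict input (the dict collapses them, making the list-level value accidental).
def Pre_find_best_path (final_population : List (Int × List Int)) : Prop :=
  final_population ≠ [] ∧ (final_population.map Prod.fst).Nodup ∧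
    ∀ p ∈ final_population, p.2 ≠ []
instance (final_population : List (Int × List Int)) : Decidable (Pre_find_best_path final_population) := by unfold Pre_find_best_path; infer_instance

def pvWitness_find_best_path : (List (Int × List Int)) := [(1, [2]), (3, [0, 4])]

def Spec_find_best_path (final_population : List (Int × List Int)) (out : Int) : Prop := out = find_best_path_alt final_population
instance (final_population : List (Int × List Int)) (out : Int) : Decidable (Spec_find_best_path final_population out) := by unfold Spec_find_best_path; infer_instance

-- ===== CLAIM (what is proved, stated in full; the proofs are below) =====
def Claim_equal_find_best_path : Prop := ∀ (final_population : List (Int × List Int)), Dom_find_best_path final_population → Pre_find_best_path final_population → Spec_find_best_path final_population (find_best_path final_population)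

-- ===== LEMMAS AND PROOFS =====

-- first-argmin fold on (key, min-value) pairs: B's loop body after the per-pair min is taken
def pvFam (b : Int × Int) (t : List (Int × Int)) : Int × Int :=
  t.foldl (fun b q => if q.2 < b.2 then q else b) b

theorem pvFam_nil (b : Int × Int) : pvFam b [] = b := rfl
theorem pvFam_cons (b q : Int × Int) (t : List (Int × Int)) :
    pvFam b (q :: t) = pvFam (if q.2 < b.2 then q else b) t := rfl

theorem pvFam_snd (t : List (Int × Int)) (b : Int × Int) :
    (pvFam b t).2 = (t.map Prod.snd).foldl min b.2 := by
  induction t generalizing b with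
  | nil => rfl
  | cons q t ih =>
      rw [pvFam_cons, ih]
      simp only [List.map_cons, List.foldl_cons]
      by_cases h : q.2 < b.2
      · rw [if_pos h]; congr 1; omega
      · rw [if_neg h]; congr 1; omega

theorem pvFoldlMin_le (t : List Int) (a : Int) : t.foldl min a ≤ a :=
  (PySem.List.foldl_min_le t a).1

theorem pvFam_snd_le (t : List (Int × Int)) (b : Int × Int) : (pvFam b t).2 ≤ b.2 := by
  rw [pvFam_snd]; exact pvFoldlMin_le _ _

-- if nothing strictly beats the seed, the fold returns the seed
theorem pvFam_eq_self (t : List (Int × Int)) (b : Int × Int)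
    (h : b.2 ≤ (pvFam b t).2) : pvFam b t = b := by
  induction t generalizing b with
  | nil => rfl
  | cons q t ih =>
      rw [pvFam_cons] at h ⊢
      by_cases hq : q.2 < b.2
      · exfalso
        rw [if_pos hq] at h
        have := pvFam_snd_le t q
        omega
      · rw [if_neg hq] at h ⊢
        exact ih b h

-- a seed that gets strictly beaten behaves like any other not-smaller seed
theorem pvFam_congr_seed (t : List (Int × Int)) (b c : Int × Int)
    (hlt : (pvFam b t).2 < b.2) (hle : b.2 ≤ c.2) : pvFam b t = pvFam c t := by
  induction t generalizing b c with
  | nil => rw [pvFam_nil] at hlt; omega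
  | cons q t ih =>
      rw [pvFam_cons] at hlt ⊢
      rw [pvFam_cons]
      by_cases hq : q.2 < b.2
      · have hq' : q.2 < c.2 := by omega
        rw [if_pos hq, if_pos hq']
      · rw [if_neg hq] at hlt ⊢
        by_cases hqc : q.2 < c.2
        · rw [if_pos hqc]
          exact ih b q hlt (by omega)
        · rw [if_neg hqc]
          exact ih b c hlt hle

theorem pvFoldlMin_mem (t : List Int) (a : Int) (h : t.foldl min a < a) :
    t.foldl min a ∈ t := by
  rcases PySem.List.foldl_min_mem t a with h' | h'
  · omega
  · exact h'

-- a strictly beaten seed can be replaced by any not-smaller one in a running min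
theorem pvFoldlMin_congr (l : List Int) (b c : Int) (hbc : b ≤ c)
    (h : l.foldl min b < b) : l.foldl min b = l.foldl min c := by
  induction l generalizing b c with
  | nil => simp at h
  | cons a l ihl =>
      simp only [List.foldl_cons] at h ⊢
      by_cases hab : a < b
      · have h1 : min b a = a := by omega
        have h2 : min c a = a := by omega
        rw [h1, h2]
      · have h1 : min b a = b := by omega
        rw [h1] at h ⊢
        exact ihl b (min c a) (by omega) h

-- A's "index the overall min back into the keys" on a (key, value) list, as a function
def pvAKey (l : List (Int × Int)) : Int :=
  (PySem.List.pyGet? (l.map Prod.fst)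
    (((PySem.List.index? (l.map Prod.snd)
        ((PySem.List.min? (l.map Prod.snd) (fun y => y)).getD 0)).getD 0 : Nat) : Int)).getD 0

-- main lemma: A's key extraction is the first-argmin fold
theorem pvAKey_eq_fam (t : List (Int × Int)) (x : Int × Int) :
    pvAKey (x :: t) = (pvFam x t).1 := by
  induction t generalizing x with
  | nil =>
      unfold pvAKey
      rw [show ([x].map Prod.snd) = [x.2] from rfl,
        show ([x].map Prod.fst) = [x.1] from rfl]
      rw [PySem.List.min?_id_cons]
      simp only [List.foldl_nil, Option.getD_some]
      rw [PySem.List.index?_cons_self]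
      simp only [Option.getD_some, Nat.cast_zero]
      rw [PySem.List.pyGet?_zero_cons]
      rfl
  | cons q t ih =>
      have hmapc : (x :: q :: t).map Prod.snd = x.2 :: (q :: t).map Prod.snd := rfl
      have hmapf : (x :: q :: t).map Prod.fst = x.1 :: (q :: t).map Prod.fst := rfl
      have hmin : PySem.List.min? ((x :: q :: t).map Prod.snd) (fun y => y)
          = some (((q :: t).map Prod.snd).foldl min x.2) := by
        rw [hmapc]; exact PySem.List.min?_id_cons x.2 ((q :: t).map Prod.snd)
      unfold pvAKey
      rw [hmin, Option.getD_some]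
      set m := ((q :: t).map Prod.snd).foldl min x.2 with hm
      have hle : m ≤ x.2 := by rw [hm]; exact pvFoldlMin_le _ _
      by_cases hxle : x.2 ≤ m
      · -- the head already attains the minimum: index 0, and the fold keeps the head
        have heq : m = x.2 := by omega
        rw [hmapc, heq, PySem.List.index?_cons_self, Option.getD_some, Nat.cast_zero,
          hmapf, PySem.List.pyGet?_zero_cons, Option.getD_some]
        have hfam : pvFam x (q :: t) = x := by
          apply pvFam_eq_self
          rw [pvFam_snd, ← hm]
          omega
        rw [hfam]
      · have hmlt : m < x.2 := by omega
        have hmem : m ∈ (q :: t).map Prod.snd := by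
          rw [hm]
          exact pvFoldlMin_mem _ _ (by rw [← hm]; omega)
        obtain ⟨k, hk⟩ := Option.isSome_iff_exists.mp
          ((PySem.List.index?_isSome_iff _ _).mpr hmem)
        rw [hmapc, PySem.List.index?_cons_of_ne _ (show x.2 ≠ m by omega), hk]
        simp only [Option.map_some, Option.getD_some]
        -- the tail's own minimum equals m
        have hmtail : (t.map Prod.snd).foldl min q.2 = m := by
          rw [hm]
          have hfc : ((q :: t).map Prod.snd).foldl min x.2
              = (t.map Prod.snd).foldl min (min x.2 q.2) := rfl
          rw [hfc]
          by_cases hq : q.2 ≤ x.2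
          · have : min x.2 q.2 = q.2 := by omega
            rw [this]
          · have hx2 : min x.2 q.2 = x.2 := by omega
            rw [hx2]
            have hlt' : (t.map Prod.snd).foldl min x.2 < x.2 := by
              have : m = (t.map Prod.snd).foldl min x.2 := by rw [hm, hfc, hx2]
              omega
            exact (pvFoldlMin_congr _ _ _ (by omega) hlt').symm
        -- A-side tail: pvAKey (q :: t) computes the same pyGet?
        have hmin' : PySem.List.min? ((q :: t).map Prod.snd) (fun y => y)
            = some ((t.map Prod.snd).foldl min q.2) := by
          rw [show (q :: t).map Prod.snd = q.2 :: t.map Prod.snd from rfl]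
          exact PySem.List.min?_id_cons q.2 (t.map Prod.snd)
        have hA : pvAKey (q :: t)
            = (PySem.List.pyGet? ((q :: t).map Prod.fst) ((k : Nat) : Int)).getD 0 := by
          unfold pvAKey
          rw [hmin', Option.getD_some, hmtail, hk, Option.getD_some]
        rw [hmapf]
        rw [show (((k + 1 : Nat) : Int)) = ((k : Nat) : Int) + 1 by push_cast; ring]
        rw [PySem.List.pyGet?_cons_succ, ← hA, ih q]
        -- B side: the seed x is strictly beaten, so it behaves like seed q
        rw [pvFam_cons]
        by_cases hqx : q.2 < x.2
        · rw [if_pos hqx]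
        · rw [if_neg hqx]
          have hlt2 : (pvFam x t).2 < x.2 := by
            rw [pvFam_snd]
            have hfc : ((q :: t).map Prod.snd).foldl min x.2
                = (t.map Prod.snd).foldl min (min x.2 q.2) := rfl
            have hx2 : min x.2 q.2 = x.2 := by omega
            rw [hm, hfc, hx2] at hmlt
            omega
          rw [pvFam_congr_seed t x q hlt2 (by omega)]

-- B's option fold is pvFam once started
theorem pvBFold (t : List (Int × Int)) (b : Int × Int) :
    t.foldl (fun acc q =>
        match acc with
        | none => some q
        | some (bg, bv) => if q.2 < bv then some (q.1, q.2) else some (bg, bv))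
      (some b) = some (pvFam b t) := by
  induction t generalizing b with
  | nil => rfl
  | cons q t ih =>
      simp only [List.foldl_cons]
      rw [pvFam_cons]
      obtain ⟨bg, bv⟩ := b
      by_cases h : q.2 < bv
      · simpa [h] using ih (q.1, q.2)
      · simpa [h] using ih (bg, bv)

-- A's inner body: values.index(min(values)) then values[...] gives min(values)
theorem pvInner (vs : List Int) (h : vs ≠ []) :
    (PySem.List.pyGet? vs
      (((PySem.List.index? vs ((PySem.List.min? vs (fun y => y)).getD 0)).getD 0 : Nat) : Int)).getD 0
      = (PySem.List.min? vs (fun y => y)).getD 0 := by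
  obtain ⟨m, hm⟩ : ∃ m, PySem.List.min? vs (fun y => y) = some m := by
    cases hmo : PySem.List.min? vs (fun y => y) with
    | none => exact absurd ((PySem.List.min?_eq_none_iff _ _).mp hmo) h
    | some m => exact ⟨m, rfl⟩
  have hmem : m ∈ vs := PySem.List.min?_mem hm
  obtain ⟨k, hk⟩ := Option.isSome_iff_exists.mp
    ((PySem.List.index?_isSome_iff _ _).mpr hmem)
  obtain ⟨hklt, hkm, -⟩ := PySem.List.getElem_of_index?_eq_some hk
  rw [hm, Option.getD_some, hk, Option.getD_some, PySem.List.pyGet?_natCast,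
    List.getElem?_eq_getElem hklt, Option.getD_some, hkm]

-- ===== VERDICT (by name: the statement is the Claim_ definition above) =====
theorem find_best_path_spec : Claim_equal_find_best_path := by
  intro fp _ hpre
  obtain ⟨hne, hnd, hvals⟩ := hpre
  unfold Spec_find_best_path find_best_path find_best_path_alt
  -- A's dict-building fold: each lookup returns the pair's own values, and the
  -- inserted value is that generation's minimum
  have hstep :
      fp.foldl
        (fun bp generation =>
          let values := (PySem.Dict.get? (PySem.Dict.mk fp) generation.1).getD []
          let index_of_best :=
            (PySem.List.index? values ((PySem.List.min? values (fun y => y)).getD 0)).getD 0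
          PySem.Dict.insert bp generation.1
            ((PySem.List.pyGet? values (index_of_best : Int)).getD 0))
        (PySem.Dict.mk [])
        = fp.foldl
            (fun bp p => PySem.Dict.insert bp p.1 ((PySem.List.min? p.2 (fun y => y)).getD 0))
            (PySem.Dict.mk []) := by
    apply PySem.List.foldl_congr_mem
    intro bp p hp
    have hget : PySem.Dict.get? (PySem.Dict.mk fp) p.1 = some p.2 :=
      PySem.Dict.get?_of_mem_items (d := PySem.Dict.mk fp) hp hnd
    simp only [hget, Option.getD_some]
    rw [pvInner p.2 (hvals p hp)]
  rw [hstep]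
  -- the keys are fresh and distinct, so the dict's items are just the mapped list
  have hitems :
      (fp.foldl
        (fun bp p => PySem.Dict.insert bp p.1 ((PySem.List.min? p.2 (fun y => y)).getD 0))
        (PySem.Dict.mk [])).items
        = fp.map (fun p => (p.1, (PySem.List.min? p.2 (fun y => y)).getD 0)) := by
    rw [PySem.Dict.items_foldl_insert_fresh (l := fp) (k := Prod.fst)
      (v := fun p => (PySem.List.min? p.2 (fun y => y)).getD 0) (d := PySem.Dict.mk [])
      (by intro a _; rfl) hnd]
    rfl
  show (PySem.List.pyGet? (PySem.Dict.keys
      (fp.foldl (fun bp p => PySem.Dict.insert bp p.1 ((PySem.List.min? p.2 (fun y => y)).getD 0))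
        (PySem.Dict.mk [])))
      (((PySem.List.index? (PySem.Dict.values
          (fp.foldl (fun bp p => PySem.Dict.insert bp p.1 ((PySem.List.min? p.2 (fun y => y)).getD 0))
            (PySem.Dict.mk [])))
        ((PySem.List.min? (PySem.Dict.values
            (fp.foldl (fun bp p => PySem.Dict.insert bp p.1 ((PySem.List.min? p.2 (fun y => y)).getD 0))
              (PySem.Dict.mk []))) (fun y => y)).getD 0)).getD 0 : Nat) : Int)).getD 0
    = match fp.foldl
        (fun acc p =>
          let m := (PySem.List.min? p.2 (fun y => y)).getD 0
          match acc with
          | none => some (p.1, m)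
          | some (bg, bv) => if m < bv then some (p.1, m) else some (bg, bv))
        (none : Option (Int × Int)) with
      | none => 0
      | some (bg, _) => bg
  rw [show ∀ d : PySem.Dict Int Int, PySem.Dict.keys d = d.items.map Prod.fst from fun _ => rfl,
    show ∀ d : PySem.Dict Int Int, PySem.Dict.values d = d.items.map Prod.snd from fun _ => rfl,
    hitems]
  -- B's fold over fp is the option fold over the mapped (key, min) list
  have hBmap :
      fp.foldl
        (fun acc p =>
          let m := (PySem.List.min? p.2 (fun y => y)).getD 0
          match acc with
          | none => some (p.1, m)
          | some (bg, bv) => if m < bv then some (p.1, m) else some (bg, bv))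
        (none : Option (Int × Int))
        = (fp.map (fun p => (p.1, (PySem.List.min? p.2 (fun y => y)).getD 0))).foldl
            (fun acc q =>
              match acc with
              | none => some q
              | some (bg, bv) => if q.2 < bv then some (q.1, q.2) else some (bg, bv))
            (none : Option (Int × Int)) := by
    rw [List.foldl_map]
  rw [hBmap]
  obtain ⟨x, t, rfl⟩ := List.exists_cons_of_ne_nil hne
  simp only [List.map_cons]
  rw [List.foldl_cons]
  rw [pvBFold]
  have hmain := pvAKey_eq_fam
    (t.map (fun p => (p.1, (PySem.List.min? p.2 (fun y => y)).getD 0)))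
    (x.1, (PySem.List.min? x.2 (fun y => y)).getD 0)
  unfold pvAKey at hmain
  rcases hfam : pvFam (x.1, (PySem.List.min? x.2 (fun y => y)).getD 0)
      (t.map (fun p => (p.1, (PySem.List.min? p.2 (fun y => y)).getD 0))) with ⟨a, bv⟩
  rw [hfam] at hmain ⊢
  exact hmain
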